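-- pv_equiv track=rewrite | github.com/posl/comment_recommendation | script/mod_gen/5_time/ja/260_C/6.py | calc
-- ===== SOURCE A (Python) =====
-- def calc(N, X, Y):
--     if N == 0:
--         return 0
--     elif N == 1:
--         return 0
--     elif N == 2:
--         return X + Y
--     else:
--         return calc(N-1, X, Y) + calc(N-2, X, Y)
-- ===== SOURCE B (Python) =====
-- def calc(N, X, Y):
--     a, b = 0, 1
--     for _ in range(N - 1):
--         a, b = b, a + b
--     return a * (X + Y)
-- ===== Notes on version B (the rewrite author's own statement) =====
-- stated objective: faster
-- what changed: Replaces the exponential two-branch recursion by an iterative Fibonacci loop: calc(N,X,Y) = Fib(N-1)*(X+Y).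
import Mathlib
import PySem

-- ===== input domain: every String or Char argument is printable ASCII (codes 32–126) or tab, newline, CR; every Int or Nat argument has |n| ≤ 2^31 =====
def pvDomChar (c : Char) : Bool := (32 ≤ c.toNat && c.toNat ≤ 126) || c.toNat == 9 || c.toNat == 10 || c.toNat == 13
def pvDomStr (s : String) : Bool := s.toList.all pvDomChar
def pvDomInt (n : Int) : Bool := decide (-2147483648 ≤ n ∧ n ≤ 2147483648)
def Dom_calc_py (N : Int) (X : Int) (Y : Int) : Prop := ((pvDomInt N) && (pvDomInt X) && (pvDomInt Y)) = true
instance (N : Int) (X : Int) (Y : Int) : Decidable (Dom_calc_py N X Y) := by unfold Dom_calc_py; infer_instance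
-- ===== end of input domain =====

-- B replaces A's exponential recursion by one iterative Fibonacci loop (asymptotically faster).

-- ===== PORT A =====
-- Literal transliteration of A's recursion on the value of N; recursion is on a Nat
-- measure (N.toNat), which coincides with A for every N ≥ 0 (Pre_ below excludes N < 0,
-- where A recurses without bound).
def calcA : Nat → Int → Int → Int
  | 0, _, _ => 0
  | 1, _, _ => 0
  | 2, x, y => x + y
  | (n+3), x, y => calcA (n+2) x y + calcA (n+1) x y

def calc_py (N : Int) (X : Int) (Y : Int) : Int := calcA N.toNat X Y

-- ===== PORT B =====
-- for _ in range(N-1): a, b = b, a + b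
def fibLoop : Nat → Int × Int → Int × Int
  | 0, p => p
  | (k+1), (a, b) => fibLoop k (b, a + b)

def calc_py_alt (N : Int) (X : Int) (Y : Int) : Int :=
  (fibLoop (N - 1).toNat (0, 1)).1 * (X + Y)

-- ===== PRECONDITION & SPEC =====
-- Pre_ excludes N < 0, where the Python A recurses forever (RecursionError).
def Pre_calc_py (N : Int) (X : Int) (Y : Int) : Prop := 0 ≤ N
instance (N : Int) (X : Int) (Y : Int) : Decidable (Pre_calc_py N X Y) := by unfold Pre_calc_py; infer_instance

def pvWitness_calc_py : Int × Int × Int := (6, 3, -5)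

def Spec_calc_py (N : Int) (X : Int) (Y : Int) (out : Int) : Prop := out = calc_py_alt N X Y
instance (N : Int) (X : Int) (Y : Int) (out : Int) : Decidable (Spec_calc_py N X Y out) := by unfold Spec_calc_py; infer_instance

-- ===== CLAIM (what is proved, stated in full; the proofs are below) =====
def Claim_equal_calc_py : Prop := ∀ (N : Int) (X : Int) (Y : Int), Dom_calc_py N X Y → Pre_calc_py N X Y → Spec_calc_py N X Y (calc_py N X Y)

-- ===== LEMMAS AND PROOFS =====

-- shifting the loop state by one Fibonacci step swaps/sums the final components
theorem fibLoop_shift (k : Nat) : ∀ (a b : Int),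
    fibLoop k (b, a + b) = ((fibLoop k (a, b)).2, (fibLoop k (a, b)).1 + (fibLoop k (a, b)).2) := by
  induction k with
  | zero => intro a b; simp [fibLoop]
  | succ k ih =>
      intro a b
      show fibLoop k (a + b, b + (a + b)) = _
      have := ih b (a + b)
      exact this

theorem fib1 (k : Nat) : (fibLoop (k+1) (0, 1)).1 = (fibLoop k (0, 1)).2 := by
  have h := fibLoop_shift k 0 1
  show (fibLoop k (1, 0 + 1)).1 = _
  rw [h]

theorem fib2 (k : Nat) : (fibLoop (k+1) (0, 1)).2 = (fibLoop k (0, 1)).1 + (fibLoop k (0, 1)).2 := by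
  have h := fibLoop_shift k 0 1
  show (fibLoop k (1, 0 + 1)).2 = _
  rw [h]

theorem fib_rec (k : Nat) : (fibLoop (k+2) (0, 1)).1 = (fibLoop (k+1) (0, 1)).1 + (fibLoop k (0, 1)).1 := by
  rw [fib1 (k+1), fib2 k, fib1 k]
  ring

theorem calcA_eq_fib : ∀ (n : Nat) (X Y : Int), calcA n X Y = (fibLoop (n - 1) (0, 1)).1 * (X + Y) := by
  intro n
  induction n using Nat.twoStepInduction with
  | zero => intro X Y; simp [calcA, fibLoop]
  | one => intro X Y; simp [calcA, fibLoop]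
  | more n ih1 ih2 =>
      intro X Y
      match n with
      | 0 => simp [calcA, fibLoop]
      | Nat.succ m =>
          show calcA (m + 3) X Y = (fibLoop (m + 2) (0, 1)).1 * (X + Y)
          have e1 : calcA (m + 2) X Y = (fibLoop (m + 1) (0, 1)).1 * (X + Y) := ih2 X Y
          have e2 : calcA (m + 1) X Y = (fibLoop m (0, 1)).1 * (X + Y) := ih1 X Y
          simp only [calcA]
          rw [e1, e2, fib_rec m]
          ring

-- ===== VERDICT (by name: the statement is the Claim_ definition above) =====
theorem calc_py_spec : Claim_equal_calc_py := by
  intro N X Y _ hpre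
  show calc_py N X Y = calc_py_alt N X Y
  unfold calc_py calc_py_alt
  rw [calcA_eq_fib]
  have h : N.toNat - 1 = (N - 1).toNat := by omega
  rw [h]
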